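-- pv_equiv track=rewrite | github.com/danieljhkim/DataStructures-Algorithms | python/leetcode/practice/practice10.py | totalNumbers
-- ===== SOURCE A (Python) =====
-- from typing import List
--
-- def totalNumbers(digits: List[int]) -> int:
--     ans = set()
--
--     def backtrack(used, arr):
--         if len(arr) == 3:
--             ans.add("".join(arr))
--             return
--         for i, n in enumerate(digits):
--             if i not in used:
--                 if (n == 0 and not arr) or (len(arr) == 2 and n % 2 == 1):
--                     continue
--                 used.add(i)
--                 arr.append(str(n))
--                 backtrack(used, arr)
--                 arr.pop()
--                 used.remove(i)
--
--     backtrack(set(), [])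
--     return len(ans)
-- ===== SOURCE B (Python) =====
-- from collections import Counter
--
-- def totalNumbers(digits):
--     cnt = Counter(digits)
--     evens = [z for z in cnt if z % 2 == 0]
--     ans = set()
--     for x in cnt:
--         if x == 0:
--             continue
--         cnt[x] -= 1
--         for y in cnt:
--             if cnt[y] == 0:
--                 continue
--             cnt[y] -= 1
--             for z in evens:
--                 if cnt[z] == 0:
--                     continue
--                 ans.add(str(x) + str(y) + str(z))
--             cnt[y] += 1
--         cnt[x] += 1
--     return len(ans)
-- ===== Notes on version B (the rewrite author's own statement) =====
-- stated objective: alternative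
-- what changed: A backtracks over permutations of three INDEX positions of `digits` (recursive backtracking with a used-index set); B instead builds a Counter of digit VALUES once and runs three nested loops over the distinct values only, decrementing/restoring counts to check multiset availability (intended to help on duplicate-heavy inputs; measured about 1.4x on random inputs, so not claimed as faster).
import Mathlib
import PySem

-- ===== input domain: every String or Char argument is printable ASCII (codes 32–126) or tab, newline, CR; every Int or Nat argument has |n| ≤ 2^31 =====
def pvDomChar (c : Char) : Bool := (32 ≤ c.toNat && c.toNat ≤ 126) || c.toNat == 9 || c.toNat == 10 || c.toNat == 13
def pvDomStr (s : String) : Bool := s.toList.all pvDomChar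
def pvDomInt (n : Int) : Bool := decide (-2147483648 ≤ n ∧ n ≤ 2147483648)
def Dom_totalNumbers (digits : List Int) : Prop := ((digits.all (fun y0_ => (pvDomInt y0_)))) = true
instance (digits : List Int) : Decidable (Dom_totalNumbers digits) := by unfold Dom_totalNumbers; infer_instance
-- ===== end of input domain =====

-- B replaces A's index-level backtracking with a value-frequency (Counter) search over the
-- distinct digit values, decrementing/restoring counts; same return value on every input.
-- ===== PORT A =====
-- A's nested helper `backtrack(used, arr)` (recursion) and its `for i, n in enumerate(digits)`
-- loop; `ans`, `used`, `arr` are threaded state (Python mutates and restores them in place).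
-- `fuel` only makes the recursion structural: it starts at 3 and 3 - arr.length bounds the depth.
mutual
def pvBT (digits : List Int) (fuel : Nat) (used : PySem.Set Int) (arr : List String)
    (ans : PySem.Set String) : PySem.Set String :=
  if arr.length = 3 then ans.add (PySem.Str.join "" arr)
  else
    match fuel with
    | 0 => ans
    | fuel + 1 => pvLoop digits fuel (PySem.List.enumerate digits) used arr ans
termination_by (fuel, 0)
def pvLoop (digits : List Int) (fuel : Nat) (rest : List (Int × Int)) (used : PySem.Set Int)
    (arr : List String) (ans : PySem.Set String) : PySem.Set String :=
  match rest with
  | [] => ans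
  | (i, n) :: rest =>
    if used.contains i then pvLoop digits fuel rest used arr ans
    else if (n = 0 ∧ arr = []) ∨ (arr.length = 2 ∧ PySem.Int.mod n 2 = 1) then
      pvLoop digits fuel rest used arr ans
    else
      pvLoop digits fuel rest used arr
        (pvBT digits fuel (used.add i) (arr ++ [PySem.Int.toStr n]) ans)
termination_by (fuel, rest.length + 1)
end
def totalNumbers (digits : List Int) : Int :=
  PySem.Set.len (pvBT digits 3 PySem.Set.empty [] PySem.Set.empty)
-- ===== PORT B =====
-- B's loops, innermost first; `st` is the pair (cnt, ans) of B's two mutated objects.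
def pvZLoop (x y : Int) (evens : List Int) (cnt2 : PySem.Dict Int Int)
    (ans : PySem.Set String) : PySem.Set String :=
  evens.foldl (fun ans z =>
    if cnt2.getD z 0 == 0 then ans
    else ans.add (PySem.Int.toStr x ++ PySem.Int.toStr y ++ PySem.Int.toStr z)) ans
def pvYStep (x : Int) (evens : List Int) (st : PySem.Dict Int Int × PySem.Set String)
    (y : Int) : PySem.Dict Int Int × PySem.Set String :=
  if st.1.getD y 0 == 0 then st
  else
    let cnt2 := st.1.insert y (st.1.getD y 0 - 1)
    (cnt2.insert y (cnt2.getD y 0 + 1), pvZLoop x y evens cnt2 st.2)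
def pvXStep (evens : List Int) (st : PySem.Dict Int Int × PySem.Set String)
    (x : Int) : PySem.Dict Int Int × PySem.Set String :=
  if x == 0 then st
  else
    let cnt1 := st.1.insert x (st.1.getD x 0 - 1)
    let st2 := cnt1.keys.foldl (pvYStep x evens) (cnt1, st.2)
    (st2.1.insert x (st2.1.getD x 0 + 1), st2.2)
def pvBRes (digits : List Int) : PySem.Dict Int Int × PySem.Set String :=
  let cnt := PySem.Dict.counter digits
  let evens := cnt.keys.filter (fun z => PySem.Int.mod z 2 == 0)
  cnt.keys.foldl (pvXStep evens) (cnt, PySem.Set.empty)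
def totalNumbers_alt (digits : List Int) : Int :=
  PySem.Set.len (pvBRes digits).2
-- ===== PRECONDITION & SPEC =====
def Spec_totalNumbers (digits : List Int) (out : Int) : Prop := out = totalNumbers_alt digits
instance (digits : List Int) (out : Int) : Decidable (Spec_totalNumbers digits out) := by unfold Spec_totalNumbers; infer_instance
-- ===== CLAIM (what is proved, stated in full; the proofs are below) =====
def Claim_equal_totalNumbers : Prop := ∀ (digits : List Int), Dom_totalNumbers digits → Spec_totalNumbers digits (totalNumbers digits)
-- ===== LEMMAS AND PROOFS =====
-- the common value of the three chosen digits, as count conditions ("multiset availability")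
def pvCntForm (digits : List Int) (x y z : Int) : Prop :=
  1 ≤ digits.count x ∧
  (if x = y then 1 else 0) + 1 ≤ digits.count y ∧
  (if x = z then 1 else 0) + (if y = z then 1 else 0) + 1 ≤ digits.count z
-- the same condition as A sees it: three pairwise distinct positions
def pvIdxForm (digits : List Int) (x y z : Int) : Prop :=
  ∃ i j k : Nat, i ≠ j ∧ i ≠ k ∧ j ≠ k ∧
    ∃ (hi : i < digits.length) (hj : j < digits.length) (hk : k < digits.length),
      digits[i] = x ∧ digits[j] = y ∧ digits[k] = z
def pvGood (digits : List Int) (s : String) : Prop :=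
  ∃ x y z : Int, pvCntForm digits x y z ∧ x ≠ 0 ∧ PySem.Int.mod z 2 = 0 ∧
    s = PySem.Int.toStr x ++ PySem.Int.toStr y ++ PySem.Int.toStr z
-- ---- counting helpers: count bounds ↔ distinct positions ----
lemma pv_cnt_to_idx1 (l : List Int) (x : Int) (h : 1 ≤ l.count x) :
    ∃ i : Nat, ∃ _ : i < l.length, l[i] = x := by
  have := List.count_pos_iff.mp (by omega : 0 < l.count x)
  obtain ⟨i, hi, hv⟩ := List.mem_iff_getElem.mp this
  exact ⟨i, hi, hv⟩
lemma pv_cnt_to_idx2 (l : List Int) (x : Int) (h : 2 ≤ l.count x) :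
    ∃ i j : Nat, i ≠ j ∧ ∃ (_ : i < l.length) (_ : j < l.length), l[i] = x ∧ l[j] = x := by
  induction l with
  | nil => simp at h
  | cons a t ih =>
    by_cases hax : a = x
    · have h1 : 1 ≤ t.count x := by subst hax; simp at h ⊢; omega
      obtain ⟨i, hi, hv⟩ := pv_cnt_to_idx1 t x h1
      exact ⟨0, i + 1, by omega, by simp, by simpa using Nat.succ_lt_succ hi,
        by simpa using hax, by simpa using hv⟩
    · have h2 : 2 ≤ t.count x := by simpa [List.count_cons, hax] using h
      obtain ⟨i, j, hij, hi, hj, v1, v2⟩ := ih h2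
      exact ⟨i + 1, j + 1, by omega, by simpa using Nat.succ_lt_succ hi,
        by simpa using Nat.succ_lt_succ hj, by simpa using v1, by simpa using v2⟩
lemma pv_cnt_to_idx3 (l : List Int) (x : Int) (h : 3 ≤ l.count x) :
    ∃ i j k : Nat, i ≠ j ∧ i ≠ k ∧ j ≠ k ∧
      ∃ (_ : i < l.length) (_ : j < l.length) (_ : k < l.length),
        l[i] = x ∧ l[j] = x ∧ l[k] = x := by
  induction l with
  | nil => simp at h
  | cons a t ih =>
    by_cases hax : a = x
    · have h2 : 2 ≤ t.count x := by subst hax; simp at h ⊢; omega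
      obtain ⟨i, j, hij, hi, hj, v1, v2⟩ := pv_cnt_to_idx2 t x h2
      exact ⟨0, i + 1, j + 1, by omega, by omega, by omega, by simp,
        by simpa using Nat.succ_lt_succ hi, by simpa using Nat.succ_lt_succ hj,
        by simpa using hax, by simpa using v1, by simpa using v2⟩
    · have h3 : 3 ≤ t.count x := by simpa [List.count_cons, hax] using h
      obtain ⟨i, j, k, hij, hik, hjk, hi, hj, hk, v1, v2, v3⟩ := ih h3
      exact ⟨i + 1, j + 1, k + 1, by omega, by omega, by omega,
        by simpa using Nat.succ_lt_succ hi, by simpa using Nat.succ_lt_succ hj,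
        by simpa using Nat.succ_lt_succ hk, by simpa using v1, by simpa using v2, by simpa using v3⟩
lemma pv_idx_to_cnt1 (l : List Int) (x : Int) (i : Nat) (hi : i < l.length) (hv : l[i] = x) :
    1 ≤ l.count x := by
  have : x ∈ l := hv ▸ List.getElem_mem hi
  have := List.count_pos_iff.mpr this
  omega
lemma pv_idx_to_cnt2 (l : List Int) (x : Int) :
    ∀ i j : Nat, i ≠ j → ∀ (_ : i < l.length) (_ : j < l.length),
      l[i] = x → l[j] = x → 2 ≤ l.count x := by
  induction l with
  | nil => intro i j _ hi; simp at hi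
  | cons a t ih =>
    intro i j hij hi hj v1 v2
    match i, j with
    | 0, 0 => omega
    | 0, j + 1 =>
      simp at v1
      have := pv_idx_to_cnt1 t x j (by simpa using hj) (by simpa using v2)
      rw [v1, List.count_cons_self]; omega
    | i + 1, 0 =>
      simp at v2
      have := pv_idx_to_cnt1 t x i (by simpa using hi) (by simpa using v1)
      rw [v2, List.count_cons_self]; omega
    | i + 1, j + 1 =>
      have := ih i j (by omega) (by simpa using hi) (by simpa using hj)
        (by simpa using v1) (by simpa using v2)
      simp [List.count_cons]; omega
lemma pv_idx_to_cnt3 (l : List Int) (x : Int) :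
    ∀ i j k : Nat, i ≠ j → i ≠ k → j ≠ k →
      ∀ (_ : i < l.length) (_ : j < l.length) (_ : k < l.length),
      l[i] = x → l[j] = x → l[k] = x → 3 ≤ l.count x := by
  induction l with
  | nil => intro i j k _ _ _ hi; simp at hi
  | cons a t ih =>
    intro i j k hij hik hjk hi hj hk v1 v2 v3
    match i, j, k with
    | 0, j + 1, k + 1 =>
      simp at v1
      have := pv_idx_to_cnt2 t x j k (by omega) (by simpa using hj) (by simpa using hk)
        (by simpa using v2) (by simpa using v3)
      rw [v1, List.count_cons_self]; omega
    | i + 1, 0, k + 1 =>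
      simp at v2
      have := pv_idx_to_cnt2 t x i k (by omega) (by simpa using hi) (by simpa using hk)
        (by simpa using v1) (by simpa using v3)
      rw [v2, List.count_cons_self]; omega
    | i + 1, j + 1, 0 =>
      simp at v3
      have := pv_idx_to_cnt2 t x i j (by omega) (by simpa using hi) (by simpa using hj)
        (by simpa using v1) (by simpa using v2)
      rw [v3, List.count_cons_self]; omega
    | i + 1, j + 1, k + 1 =>
      have := ih i j k (by omega) (by omega) (by omega) (by simpa using hi)
        (by simpa using hj) (by simpa using hk) (by simpa using v1) (by simpa using v2)
        (by simpa using v3)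
      simp [List.count_cons]; omega
lemma pv_idx_iff_cnt (l : List Int) (x y z : Int) :
    pvIdxForm l x y z ↔ pvCntForm l x y z := by
  unfold pvIdxForm pvCntForm
  constructor
  · rintro ⟨i, j, k, hij, hik, hjk, hi, hj, hk, vi, vj, vk⟩
    refine ⟨pv_idx_to_cnt1 l x i hi vi, ?_, ?_⟩
    · by_cases hxy : x = y
      · rw [if_pos hxy]
        exact pv_idx_to_cnt2 l y i j hij hi hj (hxy ▸ vi) vj
      · rw [if_neg hxy]
        have := pv_idx_to_cnt1 l y j hj vj; omega
    · by_cases hxz : x = z <;> by_cases hyz : y = z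
      · rw [if_pos hxz, if_pos hyz]
        exact pv_idx_to_cnt3 l z i j k hij hik hjk hi hj hk (hxz ▸ vi) (hyz ▸ vj) vk
      · rw [if_pos hxz, if_neg hyz]
        have := pv_idx_to_cnt2 l z i k hik hi hk (hxz ▸ vi) vk; omega
      · rw [if_neg hxz, if_pos hyz]
        have := pv_idx_to_cnt2 l z j k hjk hj hk (hyz ▸ vj) vk; omega
      · rw [if_neg hxz, if_neg hyz]
        have := pv_idx_to_cnt1 l z k hk vk; omega
  · rintro ⟨h1, h2, h3⟩
    by_cases hxy : x = y <;> by_cases hxz : x = z <;> by_cases hyz : y = z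
    · -- all equal
      rw [if_pos hxz, if_pos hyz] at h3
      obtain ⟨i, j, k, hij, hik, hjk, hi, hj, hk, v1, v2, v3⟩ := pv_cnt_to_idx3 l z (by omega)
      exact ⟨i, j, k, hij, hik, hjk, hi, hj, hk, by rw [v1, hxz], by rw [v2, hyz], v3⟩
    · exact absurd (hxy.symm.trans hxz) hyz
    · exact absurd (hxy.trans hyz) hxz
    · -- x = y, z different
      rw [if_pos hxy] at h2
      rw [if_neg hxz, if_neg hyz] at h3
      obtain ⟨i, j, hij, hi, hj, v1, v2⟩ := pv_cnt_to_idx2 l y (by omega)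
      obtain ⟨k, hk, v3⟩ := pv_cnt_to_idx1 l z (by omega)
      refine ⟨i, j, k, hij, ?_, ?_, hi, hj, hk, by rw [v1, hxy], v2, v3⟩
      · intro h; subst h; exact hyz (v1.symm.trans v3)
      · intro h; subst h; exact hyz (v2.symm.trans v3)
    · exact absurd (hxz.trans hyz.symm) hxy
    · -- x = z, y different
      rw [if_neg hxy] at h2
      rw [if_pos hxz, if_neg hyz] at h3
      obtain ⟨i, k, hik, hi, hk, v1, v3⟩ := pv_cnt_to_idx2 l z (by omega)
      obtain ⟨j, hj, v2⟩ := pv_cnt_to_idx1 l y (by omega)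
      refine ⟨i, j, k, ?_, hik, ?_, hi, hj, hk, by rw [v1, hxz], v2, v3⟩
      · intro h; subst h; exact hyz (v2.symm.trans v1)
      · intro h; subst h; exact hyz (v2.symm.trans v3)
    · -- y = z, x different
      rw [if_neg hxy] at h2
      rw [if_neg hxz, if_pos hyz] at h3
      obtain ⟨j, k, hjk, hj, hk, v2, v3⟩ := pv_cnt_to_idx2 l z (by omega)
      obtain ⟨i, hi, v1⟩ := pv_cnt_to_idx1 l x (by omega)
      refine ⟨i, j, k, ?_, ?_, hjk, hi, hj, hk, v1, by rw [v2, hyz], v3⟩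
      · intro h; subst h; exact hxz (v1.symm.trans v2)
      · intro h; subst h; exact hxz (v1.symm.trans v3)
    · -- all distinct
      rw [if_neg hxy] at h2
      rw [if_neg hxz, if_neg hyz] at h3
      obtain ⟨i, hi, v1⟩ := pv_cnt_to_idx1 l x (by omega)
      obtain ⟨j, hj, v2⟩ := pv_cnt_to_idx1 l y (by omega)
      obtain ⟨k, hk, v3⟩ := pv_cnt_to_idx1 l z (by omega)
      refine ⟨i, j, k, ?_, ?_, ?_, hi, hj, hk, v1, v2, v3⟩
      · intro h; subst h; exact hxy (v1.symm.trans v2)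
      · intro h; subst h; exact hxz (v1.symm.trans v3)
      · intro h; subst h; exact hyz (v2.symm.trans v3)
-- ---- generic loop shapes on PySem.Set accumulators ----
lemma pv_mem_foldl_set {α : Type} (l : List α) (g : PySem.Set String → α → PySem.Set String)
    (Q : α → String → Prop)
    (hg : ∀ ans x, x ∈ l → ∀ s, s ∈ g ans x ↔ (s ∈ ans ∨ Q x s)) :
    ∀ init s, (s ∈ l.foldl g init ↔ (s ∈ init ∨ ∃ x ∈ l, Q x s)) := by
  induction l with
  | nil => simp
  | cons a t ih =>
    intro init s
    rw [List.foldl_cons, ih (fun ans x hx => hg ans x (by simp [hx])) (g init a) s,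
      hg init a (by simp) s]
    constructor
    · rintro ((h | h) | ⟨x, hx, hq⟩)
      · exact .inl h
      · exact .inr ⟨a, by simp, h⟩
      · exact .inr ⟨x, by simp [hx], hq⟩
    · rintro (h | ⟨x, hx, hq⟩)
      · exact .inl (.inl h)
      · rcases List.mem_cons.mp hx with rfl | hx
        · exact .inl (.inr hq)
        · exact .inr ⟨x, hx, hq⟩
lemma pv_nodup_foldl_set {α : Type} (l : List α) (g : PySem.Set String → α → PySem.Set String)
    (hg : ∀ ans x, ans.Nodup → (g ans x).Nodup) :
    ∀ init : PySem.Set String, init.Nodup → (l.foldl g init).Nodup := by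
  induction l with
  | nil => simp only [List.foldl_nil]; exact fun _ h => h
  | cons a t ih => intro init h; exact ih (g init a) (hg init a h)
lemma pv_foldl_prod_fst_fixed {α : Type} (l : List α)
    (g : PySem.Dict Int Int × PySem.Set String → α → PySem.Dict Int Int × PySem.Set String)
    (c0 : PySem.Dict Int Int) (h : α → PySem.Set String → PySem.Set String)
    (hg : ∀ ans x, x ∈ l → g (c0, ans) x = (c0, h x ans)) :
    ∀ ans, l.foldl g (c0, ans) = (c0, l.foldl (fun a x => h x a) ans) := by
  induction l with
  | nil => simp
  | cons a t ih =>
    intro ans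
    rw [List.foldl_cons, hg ans a (by simp), List.foldl_cons]
    exact ih (fun ans x hx => hg ans x (by simp [hx])) _
-- ===== A-side characterization =====
lemma pv_bt_len3 (digits : List Int) (f : Nat) (u : PySem.Set Int) (arr : List String)
    (h : arr.length = 3) (ans : PySem.Set String) :
    pvBT digits f u arr ans = ans.add (PySem.Str.join "" arr) := by
  rw [pvBT.eq_def, if_pos h]
lemma pv_loop_mem (digits : List Int) (f : Nat) (u : PySem.Set Int) (arr : List String)
    (Q : Int → Int → String → Prop)
    (hbt : ∀ i n ans s, u.contains i = false →
      ¬((n = 0 ∧ arr = []) ∨ (arr.length = 2 ∧ PySem.Int.mod n 2 = 1)) →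
      (s ∈ pvBT digits f (u.add i) (arr ++ [PySem.Int.toStr n]) ans ↔ (s ∈ ans ∨ Q i n s))) :
    ∀ rest ans s, s ∈ pvLoop digits f rest u arr ans ↔
      (s ∈ ans ∨ ∃ p ∈ rest, u.contains p.1 = false ∧
        ¬((p.2 = 0 ∧ arr = []) ∨ (arr.length = 2 ∧ PySem.Int.mod p.2 2 = 1)) ∧ Q p.1 p.2 s) := by
  intro rest
  induction rest with
  | nil => intro ans s; rw [pvLoop.eq_def]; simp
  | cons p t ih =>
    intro ans s
    obtain ⟨i, n⟩ := p
    rw [pvLoop.eq_def]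
    dsimp only
    by_cases h1 : u.contains i = true
    · rw [if_pos h1, ih]
      constructor
      · rintro (h | ⟨q, hq, hc⟩)
        · exact .inl h
        · exact .inr ⟨q, by simp [hq], hc⟩
      · rintro (h | ⟨q, hq, hc⟩)
        · exact .inl h
        · rcases List.mem_cons.mp hq with rfl | hq
          · rw [h1] at hc; simp at hc
          · exact .inr ⟨q, hq, hc⟩
    · replace h1 : u.contains i = false := by simpa using h1
      rw [if_neg (show ¬(u.contains i = true) by rw [h1]; simp)]
      by_cases h2 : ((n = 0 ∧ arr = []) ∨ (arr.length = 2 ∧ PySem.Int.mod n 2 = 1))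
      · rw [if_pos h2, ih]
        constructor
        · rintro (h | ⟨q, hq, hc⟩)
          · exact .inl h
          · exact .inr ⟨q, by simp [hq], hc⟩
        · rintro (h | ⟨q, hq, hc⟩)
          · exact .inl h
          · rcases List.mem_cons.mp hq with rfl | hq
            · exact absurd h2 hc.2.1
            · exact .inr ⟨q, hq, hc⟩
      · rw [if_neg h2, ih, hbt i n ans s h1 h2]
        constructor
        · rintro ((h | h) | ⟨q, hq, hc⟩)
          · exact .inl h
          · exact .inr ⟨(i, n), by simp, h1, h2, h⟩
          · exact .inr ⟨q, by simp [hq], hc⟩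
        · rintro (h | ⟨q, hq, hc⟩)
          · exact .inl (.inl h)
          · rcases List.mem_cons.mp hq with rfl | hq
            · exact .inl (.inr hc.2.2)
            · exact .inr ⟨q, hq, hc⟩
lemma pv_bt_len2 (digits : List Int) (f : Nat) (u : PySem.Set Int) (s1 s2 : String)
    (ans : PySem.Set String) (s : String) :
    s ∈ pvBT digits (f+1) u [s1, s2] ans ↔
      (s ∈ ans ∨ ∃ p ∈ PySem.List.enumerate digits, u.contains p.1 = false ∧
        PySem.Int.mod p.2 2 ≠ 1 ∧ s = PySem.Str.join "" [s1, s2, PySem.Int.toStr p.2]) := by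
  rw [pvBT.eq_def, if_neg (by simp)]
  rw [pv_loop_mem digits f u [s1, s2]
    (fun i n s => s = PySem.Str.join "" [s1, s2, PySem.Int.toStr n])
    (fun i n ans' s' _ _ => by
      rw [show [s1, s2] ++ [PySem.Int.toStr n] = [s1, s2, PySem.Int.toStr n] from rfl,
        pv_bt_len3 digits f (u.add i) _ (by simp) ans']
      exact PySem.Set.mem_add ans' _ s')]
  simp
lemma pv_bt_len1 (digits : List Int) (f : Nat) (u : PySem.Set Int) (s1 : String)
    (ans : PySem.Set String) (s : String) :
    s ∈ pvBT digits (f+2) u [s1] ans ↔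
      (s ∈ ans ∨ ∃ p2 ∈ PySem.List.enumerate digits, u.contains p2.1 = false ∧
        ∃ p3 ∈ PySem.List.enumerate digits, (u.add p2.1).contains p3.1 = false ∧
          PySem.Int.mod p3.2 2 ≠ 1 ∧
          s = PySem.Str.join "" [s1, PySem.Int.toStr p2.2, PySem.Int.toStr p3.2]) := by
  rw [pvBT.eq_def, if_neg (by simp)]
  rw [pv_loop_mem digits (f+1) u [s1]
    (fun i n s => ∃ p3 ∈ PySem.List.enumerate digits, (u.add i).contains p3.1 = false ∧
      PySem.Int.mod p3.2 2 ≠ 1 ∧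
      s = PySem.Str.join "" [s1, PySem.Int.toStr n, PySem.Int.toStr p3.2])
    (fun i n ans' s' _ _ => by
      rw [show [s1] ++ [PySem.Int.toStr n] = [s1, PySem.Int.toStr n] from rfl]
      exact pv_bt_len2 digits f (u.add i) s1 (PySem.Int.toStr n) ans' s')]
  simp
lemma pv_bt_len0 (digits : List Int) (f : Nat) (u : PySem.Set Int)
    (ans : PySem.Set String) (s : String) :
    s ∈ pvBT digits (f+3) u [] ans ↔
      (s ∈ ans ∨ ∃ p1 ∈ PySem.List.enumerate digits, u.contains p1.1 = false ∧ p1.2 ≠ 0 ∧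
        ∃ p2 ∈ PySem.List.enumerate digits, (u.add p1.1).contains p2.1 = false ∧
          ∃ p3 ∈ PySem.List.enumerate digits, ((u.add p1.1).add p2.1).contains p3.1 = false ∧
            PySem.Int.mod p3.2 2 ≠ 1 ∧
            s = PySem.Str.join "" [PySem.Int.toStr p1.2, PySem.Int.toStr p2.2, PySem.Int.toStr p3.2]) := by
  rw [pvBT.eq_def, if_neg (by simp)]
  rw [pv_loop_mem digits (f+2) u []
    (fun i n s => ∃ p2 ∈ PySem.List.enumerate digits, (u.add i).contains p2.1 = false ∧
      ∃ p3 ∈ PySem.List.enumerate digits, ((u.add i).add p2.1).contains p3.1 = false ∧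
        PySem.Int.mod p3.2 2 ≠ 1 ∧
        s = PySem.Str.join "" [PySem.Int.toStr n, PySem.Int.toStr p2.2, PySem.Int.toStr p3.2])
    (fun i n ans' s' _ _ => by
      rw [show ([] : List String) ++ [PySem.Int.toStr n] = [PySem.Int.toStr n] from rfl]
      exact pv_bt_len1 digits f (u.add i) (PySem.Int.toStr n) ans' s')]
  simp
lemma pv_join3 (a b c : String) : PySem.Str.join "" [a, b, c] = a ++ b ++ c := by
  have h : ∀ s t : String, s ++ t = String.ofList (s.toList ++ t.toList) :=
    fun s t => String.congr_append s t
  rw [h (a ++ b) c, h a b]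
  simp [PySem.Str.join, PySem.Chars.join, List.intercalate]
lemma pv_contains_false_iff (u : PySem.Set Int) (x : Int) :
    u.contains x = false ↔ x ∉ u := by
  rw [← PySem.Set.contains_iff]; cases u.contains x <;> simp

lemma pv_memA (digits : List Int) (s : String) :
    s ∈ pvBT digits 3 PySem.Set.empty [] PySem.Set.empty ↔ pvGood digits s := by
  rw [show (3:Nat) = 0+3 from rfl, pv_bt_len0 digits 0 PySem.Set.empty PySem.Set.empty s]
  simp only [PySem.List.mem_enumerate_iff, pv_contains_false_iff, PySem.Set.mem_add,
    PySem.Set.empty, List.not_mem_nil, false_or, not_false_iff,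
    true_and, not_or]
  constructor
  · rintro ⟨p1, ⟨k1, hk1, rfl⟩, hnz, p2, ⟨k2, hk2, rfl⟩, hne2, p3, ⟨k3, hk3, rfl⟩,
      ⟨hne31, hne32⟩, hmod, rfl⟩
    refine ⟨digits[k1], digits[k2], digits[k3],
      (pv_idx_iff_cnt digits _ _ _).mp ⟨k1, k2, k3, ?_, ?_, ?_, hk1, hk2, hk3, rfl, rfl, rfl⟩,
      hnz, ?_, pv_join3 _ _ _⟩
    · intro h; exact hne2 (by simp; omega)
    · intro h; exact hne31 (by simp; omega)
    · intro h; exact hne32 (by simp; omega)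
    · rcases PySem.Int.mod_two_eq digits[k3] with h | h
      · exact h
      · exact absurd h hmod
  · rintro ⟨x, y, z, hcnt, hnz, hmod, rfl⟩
    obtain ⟨i, j, k, hij, hik, hjk, hi, hj, hk, rfl, rfl, rfl⟩ :=
      (pv_idx_iff_cnt digits x y z).mpr hcnt
    refine ⟨(0 + (i : Int), digits[i]), ⟨i, hi, rfl⟩, hnz,
      (0 + (j : Int), digits[j]), ⟨j, hj, rfl⟩, ?_,
      (0 + (k : Int), digits[k]), ⟨k, hk, rfl⟩, ⟨?_, ?_⟩, ?_, (pv_join3 _ _ _).symm⟩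
    · intro h; exact hij (by simp at h; omega)
    · intro h; exact hik (by simp at h; omega)
    · intro h; exact hjk (by simp at h; omega)
    · rw [hmod]; omega

lemma pv_nodup_loop (digits : List Int) (f : Nat) (u : PySem.Set Int) (arr : List String)
    (hbt : ∀ u arr (ans : PySem.Set String), ans.Nodup → (pvBT digits f u arr ans).Nodup) :
    ∀ rest (ans : PySem.Set String), ans.Nodup → (pvLoop digits f rest u arr ans).Nodup := by
  intro rest
  induction rest with
  | nil => intro ans h; rw [pvLoop.eq_def]; exact h
  | cons p t ih =>
    intro ans h
    obtain ⟨i, n⟩ := p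
    rw [pvLoop.eq_def]
    dsimp only
    split
    · exact ih ans h
    · split
      · exact ih ans h
      · exact ih _ (hbt _ _ _ h)

lemma pv_nodup_bt (digits : List Int) :
    ∀ (f : Nat) (u : PySem.Set Int) (arr : List String) (ans : PySem.Set String),
      ans.Nodup → (pvBT digits f u arr ans).Nodup := by
  intro f
  induction f with
  | zero =>
    intro u arr ans h
    rw [pvBT.eq_def]
    split
    · exact PySem.Set.nodup_add _ _ h
    · exact h
  | succ f ih =>
    intro u arr ans h
    rw [pvBT.eq_def]
    split
    · exact PySem.Set.nodup_add _ _ h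
    · exact pv_nodup_loop digits f u arr (fun u arr ans h => ih u arr ans h) _ ans h

lemma pv_nodupA (digits : List Int) :
    (pvBT digits 3 PySem.Set.empty [] PySem.Set.empty).Nodup := by
  exact pv_nodup_bt digits 3 _ _ _ (by simp [PySem.Set.empty])
-- ===== B-side characterization =====
lemma pv_insert_getD_self (d : PySem.Dict Int Int) (k : Int) (hk : d.contains k = true)
    (hnd : d.keys.Nodup) : d.insert k (d.getD k 0) = d := by
  apply PySem.Dict.ext
  rw [PySem.Dict.items_insert_of_contains d _ hk]
  have h : ∀ p ∈ d.items, (if p.1 == k then (k, d.getD k 0) else p) = p := by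
    intro p hp
    by_cases hpk : p.1 = k
    · rw [if_pos (by simp [hpk])]
      have hmem : (p.1, p.2) ∈ d.items := by simpa using hp
      have hg := PySem.Dict.getD_of_mem_items d hmem hnd 0
      rw [← hpk, hg]
    · simp [hpk]
  rw [List.map_congr_left h]
  exact List.map_id' d.items

-- B's answer set, with the count bookkeeping of the pair-state folds eliminated
def pvAnsFold (digits : List Int) : PySem.Set String :=
  (PySem.Dict.counter digits).keys.foldl (fun ans x =>
    if x == 0 then ans
    else
      let cnt1 := (PySem.Dict.counter digits).insert x
        ((PySem.Dict.counter digits).getD x 0 - 1)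
      cnt1.keys.foldl (fun ans y =>
        if cnt1.getD y 0 == 0 then ans
        else pvZLoop x y ((PySem.Dict.counter digits).keys.filter
            (fun z => PySem.Int.mod z 2 == 0))
          (cnt1.insert y (cnt1.getD y 0 - 1)) ans) ans) PySem.Set.empty

lemma pv_bres_snd (digits : List Int) : (pvBRes digits).2 = pvAnsFold digits := by
  unfold pvBRes pvAnsFold
  have hC : (PySem.Dict.counter digits).keys.Nodup := PySem.Dict.nodup_keys_counter digits
  rw [pv_foldl_prod_fst_fixed _ _ (PySem.Dict.counter digits) _ ?hg]
  case hg =>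
    intro ans x hx
    unfold pvXStep
    by_cases h0 : (x == 0) = true
    · simp only [h0, if_true]
    · simp only [h0, if_false, Bool.false_eq_true]
      have hcn1 : ((PySem.Dict.counter digits).insert x
          ((PySem.Dict.counter digits).getD x 0 - 1)).keys.Nodup :=
        PySem.Dict.nodup_keys_insert _ _ _ hC
      rw [pv_foldl_prod_fst_fixed _ _ _
        (fun y ans2 => if (((PySem.Dict.counter digits).insert x
            ((PySem.Dict.counter digits).getD x 0 - 1)).getD y 0 == 0) = true then ans2
          else pvZLoop x y ((PySem.Dict.counter digits).keys.filter
              (fun z => PySem.Int.mod z 2 == 0))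
            (((PySem.Dict.counter digits).insert x
                ((PySem.Dict.counter digits).getD x 0 - 1)).insert y
              (((PySem.Dict.counter digits).insert x
                  ((PySem.Dict.counter digits).getD x 0 - 1)).getD y 0 - 1)) ans2) ?hg2]
      case hg2 =>
        intro ans2 y hy
        unfold pvYStep
        by_cases hsk : (((PySem.Dict.counter digits).insert x
            ((PySem.Dict.counter digits).getD x 0 - 1)).getD y 0 == 0) = true
        · simp only [hsk, if_true]
        · simp only [hsk, if_false, Bool.false_eq_true]
          refine Prod.ext ?_ rfl
          simp only [PySem.Dict.getD_insert_self, PySem.Dict.insert_insert_self,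
            sub_add_cancel]
          exact pv_insert_getD_self _ y ((PySem.Dict.contains_iff_mem_keys _ _).mpr hy) hcn1
      simp only [PySem.Dict.getD_insert_self, PySem.Dict.insert_insert_self, sub_add_cancel]
      rw [pv_insert_getD_self _ x ((PySem.Dict.contains_iff_mem_keys _ _).mpr hx) hC]

lemma pv_memB (digits : List Int) (s : String) :
    s ∈ (pvBRes digits).2 ↔ pvGood digits s := by
  rw [pv_bres_snd]
  unfold pvAnsFold
  rw [pv_mem_foldl_set _ _
    (fun x s => x ≠ 0 ∧
      ∃ y ∈ ((PySem.Dict.counter digits).insert x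
          ((PySem.Dict.counter digits).getD x 0 - 1)).keys,
        ¬((PySem.Dict.counter digits).insert x
            ((PySem.Dict.counter digits).getD x 0 - 1)).getD y 0 = 0 ∧
        ∃ z ∈ (PySem.Dict.counter digits).keys.filter (fun z => PySem.Int.mod z 2 == 0),
          ¬(((PySem.Dict.counter digits).insert x
                ((PySem.Dict.counter digits).getD x 0 - 1)).insert y
              (((PySem.Dict.counter digits).insert x
                  ((PySem.Dict.counter digits).getD x 0 - 1)).getD y 0 - 1)).getD z 0 = 0 ∧
          s = PySem.Int.toStr x ++ PySem.Int.toStr y ++ PySem.Int.toStr z) ?hgx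
    PySem.Set.empty s]
  case hgx =>
    intro ans x hx s'
    dsimp only
    by_cases h0 : (x == 0) = true
    · rw [if_pos h0]
      simp only [beq_iff_eq] at h0
      constructor
      · exact Or.inl
      · rintro (h | ⟨hc, _⟩)
        · exact h
        · exact absurd h0 hc
    · rw [if_neg h0]
      simp only [beq_iff_eq] at h0
      rw [pv_mem_foldl_set _ _
        (fun y s => ¬((PySem.Dict.counter digits).insert x
            ((PySem.Dict.counter digits).getD x 0 - 1)).getD y 0 = 0 ∧
          ∃ z ∈ (PySem.Dict.counter digits).keys.filter (fun z => PySem.Int.mod z 2 == 0),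
            ¬(((PySem.Dict.counter digits).insert x
                  ((PySem.Dict.counter digits).getD x 0 - 1)).insert y
                (((PySem.Dict.counter digits).insert x
                    ((PySem.Dict.counter digits).getD x 0 - 1)).getD y 0 - 1)).getD z 0 = 0 ∧
            s = PySem.Int.toStr x ++ PySem.Int.toStr y ++ PySem.Int.toStr z) ?hgy ans s']
      case hgy =>
        intro ans2 y hy s2
        dsimp only
        by_cases hsk : (((PySem.Dict.counter digits).insert x
            ((PySem.Dict.counter digits).getD x 0 - 1)).getD y 0 == 0) = true
        · rw [if_pos hsk]
          simp only [beq_iff_eq] at hsk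
          constructor
          · exact Or.inl
          · rintro (h | ⟨hc, _⟩)
            · exact h
            · exact absurd hsk hc
        · rw [if_neg hsk]
          simp only [beq_iff_eq] at hsk
          unfold pvZLoop
          rw [pv_mem_foldl_set _ _
            (fun z s => ¬(((PySem.Dict.counter digits).insert x
                  ((PySem.Dict.counter digits).getD x 0 - 1)).insert y
                (((PySem.Dict.counter digits).insert x
                    ((PySem.Dict.counter digits).getD x 0 - 1)).getD y 0 - 1)).getD z 0 = 0 ∧
              s = PySem.Int.toStr x ++ PySem.Int.toStr y ++ PySem.Int.toStr z) ?hgz ans2 s2]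
          case hgz =>
            intro ans3 z hz s3
            dsimp only
            by_cases hz0 : ((((PySem.Dict.counter digits).insert x
                  ((PySem.Dict.counter digits).getD x 0 - 1)).insert y
                (((PySem.Dict.counter digits).insert x
                    ((PySem.Dict.counter digits).getD x 0 - 1)).getD y 0 - 1)).getD z 0 == 0) = true
            · rw [if_pos hz0]
              simp only [beq_iff_eq] at hz0
              constructor
              · exact Or.inl
              · rintro (h | ⟨hc, _⟩)
                · exact h
                · exact absurd hz0 hc
            · rw [if_neg hz0]
              simp only [beq_iff_eq] at hz0
              rw [PySem.Set.mem_add]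
              constructor
              · rintro (h | h)
                · exact Or.inl h
                · exact Or.inr ⟨hz0, h⟩
              · rintro (h | ⟨_, h⟩)
                · exact Or.inl h
                · exact Or.inr h
          constructor
          · rintro (h | h)
            · exact Or.inl h
            · exact Or.inr ⟨hsk, h⟩
          · rintro (h | ⟨_, h⟩)
            · exact Or.inl h
            · exact Or.inr h
      constructor
      · rintro (h | h)
        · exact Or.inl h
        · exact Or.inr ⟨h0, h⟩
      · rintro (h | ⟨_, h⟩)
        · exact Or.inl h
        · exact Or.inr h
  simp only [PySem.Set.empty, List.not_mem_nil, false_or]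
  have hkeys : ∀ v : Int, v ∈ (PySem.Dict.counter digits).keys ↔ v ∈ digits := by
    intro v; rw [PySem.Dict.keys_counter]; exact PySem.Set.mem_ofList _ _
  have hmemc : ∀ v : Int, v ∈ digits ↔ 1 ≤ digits.count v := by
    intro v
    rw [← List.count_pos_iff (l := digits) (a := v)]
    omega
  constructor
  · rintro ⟨x, hxk, hx0, y, hyk, hy0, z, hzk, hz0, rfl⟩
    have hxd : x ∈ digits := (hkeys x).mp hxk
    have hxq : ((PySem.Dict.counter digits).contains x) = true :=
      (PySem.Dict.contains_iff_mem_keys _ _).mpr hxk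
    rw [PySem.Dict.keys_insert_of_contains _ _ hxq] at hyk
    have hyd : y ∈ digits := (hkeys y).mp hyk
    obtain ⟨hzkC, hzev⟩ := List.mem_filter.mp hzk
    have hzd : z ∈ digits := (hkeys z).mp hzkC
    simp only [beq_iff_eq] at hzev
    simp only [PySem.Dict.getD_insert, PySem.Dict.getD_counter] at hy0 hz0
    rw [hmemc] at hxd hyd hzd
    refine ⟨x, y, z, ⟨hxd, ?_, ?_⟩, hx0, hzev, rfl⟩
    · by_cases hxy : x = y
      · subst hxy; split_ifs at hy0 ⊢ <;> omega
      · split_ifs at hy0 ⊢ <;> omega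
    · by_cases hyz : y = z
      · subst hyz
        by_cases hxy : x = y
        · subst hxy; split_ifs at hy0 hz0 ⊢ <;> omega
        · split_ifs at hy0 hz0 ⊢ <;> omega
      · by_cases hxz : x = z
        · subst hxz
          by_cases hxy : x = y
          · subst hxy; split_ifs at hy0 hz0 ⊢ <;> omega
          · split_ifs at hy0 hz0 ⊢ <;> omega
        · split_ifs at hy0 hz0 ⊢ <;> omega
  · rintro ⟨x, y, z, ⟨h1, h2, h3⟩, hx0, hzev, rfl⟩
    have hxd : x ∈ digits := (hmemc x).mpr h1
    have hyd : y ∈ digits := (hmemc y).mpr (by omega)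
    have hzd : z ∈ digits := (hmemc z).mpr (by omega)
    have hxq : ((PySem.Dict.counter digits).contains x) = true :=
      (PySem.Dict.contains_iff_mem_keys _ _).mpr ((hkeys x).mpr hxd)
    have hyc := (hmemc y).mp hyd
    have hzc := (hmemc z).mp hzd
    refine ⟨x, (hkeys x).mpr hxd, hx0, y, ?_, ?_, z,
      List.mem_filter.mpr ⟨(hkeys z).mpr hzd, beq_iff_eq.mpr hzev⟩, ?_, rfl⟩
    · rw [PySem.Dict.keys_insert_of_contains _ _ hxq]
      exact (hkeys y).mpr hyd
    · simp only [PySem.Dict.getD_insert, PySem.Dict.getD_counter]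
      by_cases hxy : x = y
      · subst hxy; split_ifs at h2 ⊢ <;> omega
      · split_ifs at h2 ⊢ <;> omega
    · simp only [PySem.Dict.getD_insert, PySem.Dict.getD_counter]
      by_cases hyz : y = z
      · subst hyz
        by_cases hxy : x = y
        · subst hxy; split_ifs at h2 h3 ⊢ <;> omega
        · split_ifs at h2 h3 ⊢ <;> omega
      · by_cases hxz : x = z
        · subst hxz
          by_cases hxy : x = y
          · subst hxy; split_ifs at h2 h3 ⊢ <;> omega
          · split_ifs at h2 h3 ⊢ <;> omega
        · split_ifs at h2 h3 ⊢ <;> omega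

lemma pv_nodupB (digits : List Int) : (pvBRes digits).2.Nodup := by
  rw [pv_bres_snd]
  unfold pvAnsFold
  apply pv_nodup_foldl_set _ _ ?_ _ (by simp [PySem.Set.empty])
  intro ans x h
  dsimp only
  split
  · exact h
  · apply pv_nodup_foldl_set _ _ ?_ _ h
    intro ans2 y h2
    dsimp only
    split
    · exact h2
    · unfold pvZLoop
      apply pv_nodup_foldl_set _ _ ?_ _ h2
      intro ans3 z h3
      dsimp only
      split
      · exact h3
      · exact PySem.Set.nodup_add _ _ h3

-- ===== VERDICT (by name: the statement is the Claim_ definition above) =====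
theorem totalNumbers_spec : Claim_equal_totalNumbers := by
  intro digits _
  unfold Spec_totalNumbers totalNumbers totalNumbers_alt
  have hperm : (pvBT digits 3 PySem.Set.empty [] PySem.Set.empty).Perm (pvBRes digits).2 :=
    List.perm_of_nodup_nodup_toFinset_eq (pv_nodupA digits) (pv_nodupB digits)
      (by ext s; simp only [List.mem_toFinset]; rw [pv_memA, pv_memB])
  simp only [PySem.Set.len]
  exact congrArg Int.ofNat hperm.length_eq
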